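-- pv_equiv track=rewrite | github.com/DPamK/nlu_LabelCreater | cut_mode.py | word2index
-- ===== SOURCE A (Python) =====
-- def word2index(wordlist):
--     index = []
--     start = 0
--     for text in wordlist:
--         end = len(text) + start
--         temp = (start,end-1)
--         index.append(temp)
--         start = end
--     return index
-- ===== SOURCE B (Python) =====
-- from itertools import accumulate
--
-- def word2index(wordlist):
--     lengths = [len(t) for t in wordlist]
--     starts = list(accumulate(lengths, initial=0))
--     return [(s, s + l - 1) for s, l in zip(starts, lengths)]
-- ===== Notes on version B (the rewrite author's own statement) =====
-- stated objective: alternative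
-- what changed: Replaces the running-accumulator append loop with a table build: a lengths list, a prefix-sum starts table via itertools.accumulate, and a zip comprehension pairing starts with lengths.
import Mathlib
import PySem

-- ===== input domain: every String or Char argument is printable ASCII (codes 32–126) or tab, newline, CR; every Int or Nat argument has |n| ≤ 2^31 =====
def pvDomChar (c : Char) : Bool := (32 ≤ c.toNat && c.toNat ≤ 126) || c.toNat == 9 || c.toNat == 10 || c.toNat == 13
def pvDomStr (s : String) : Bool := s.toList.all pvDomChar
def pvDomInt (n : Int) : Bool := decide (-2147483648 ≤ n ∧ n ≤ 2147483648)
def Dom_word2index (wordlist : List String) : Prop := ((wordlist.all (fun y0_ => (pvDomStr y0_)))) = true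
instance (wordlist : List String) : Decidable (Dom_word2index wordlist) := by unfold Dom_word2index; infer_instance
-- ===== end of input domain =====

-- B rebuilds the result from a lengths table and a prefix-sum starts table instead of A's running-accumulator append loop; objective: alternative decomposition.

-- ===== PORT A =====
-- running accumulator: state = (index list so far, start)
def word2index (wordlist : List String) : List (Int × Int) :=
  (wordlist.foldl
    (fun (st : List (Int × Int) × Int) text =>
      let eend := PySem.Str.len text + st.2
      (st.1 ++ [(st.2, eend - 1)], eend))
    ([], 0)).1

-- ===== PORT B =====
-- lengths table, prefix-sum starts table (itertools.accumulate ≈ List.scanl), zip comprehension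
def word2index_alt (wordlist : List String) : List (Int × Int) :=
  let lengths := wordlist.map PySem.Str.len
  let starts := List.scanl (· + ·) 0 lengths
  (starts.zip lengths).map (fun sl => (sl.1, sl.1 + sl.2 - 1))

-- ===== PRECONDITION & SPEC =====
def Spec_word2index (wordlist : List String) (out : List (Int × Int)) : Prop := out = word2index_alt wordlist
instance (wordlist : List String) (out : List (Int × Int)) : Decidable (Spec_word2index wordlist out) := by unfold Spec_word2index; infer_instance

-- ===== CLAIM (what is proved, stated in full; the proofs are below) =====
def Claim_equal_word2index : Prop := ∀ (wordlist : List String), Dom_word2index wordlist → Spec_word2index wordlist (word2index wordlist)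

-- ===== LEMMAS AND PROOFS =====

theorem word2index_loop (wordlist : List String) (acc : List (Int × Int)) (start : Int) :
    (wordlist.foldl
      (fun (st : List (Int × Int) × Int) text =>
        let eend := PySem.Str.len text + st.2
        (st.1 ++ [(st.2, eend - 1)], eend))
      (acc, start)).1
    = acc ++ ((List.scanl (· + ·) start (wordlist.map PySem.Str.len)).zip
        (wordlist.map PySem.Str.len)).map (fun sl => (sl.1, sl.1 + sl.2 - 1)) := by
  induction wordlist generalizing acc start with
  | nil => simp
  | cons t ts ih =>
    simp only [List.foldl_cons, List.map_cons, List.scanl_cons, List.zip_cons_cons, List.map_cons]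
    rw [ih]
    simp [add_comm]

-- ===== VERDICT (by name: the statement is the Claim_ definition above) =====
theorem word2index_spec : Claim_equal_word2index := by
  intro wl _
  unfold Spec_word2index word2index word2index_alt
  simpa using word2index_loop wl [] 0
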